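-- pv_equiv track=rewrite | github.com/crestr25/advent-of-code | 2023/python/day_7.py | get_duplicates_jok
-- ===== SOURCE A (Python) =====
-- from collections import defaultdict
--
-- def get_duplicates_jok(s: str) -> dict:
--
--     res = defaultdict(int)
--     for char in s:
--         if char != "J":
--             res[char] += 1
--
--     if "J" not in s:
--         return res
--
--     if not res:
--         return {"J": 5}
--
--
--     max_key = max(res, key=res.get)
--     s = s.replace("J", max_key)
--
--     res = defaultdict(int)
--     for char in s:
--         res[char] += 1
--
--     return res
-- ===== SOURCE B (Python) =====
-- def get_duplicates_jok(s: str) -> dict: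
--     cnt = {}
--     for c in s:
--         cnt[c] = cnt.get(c, 0) + 1
--     if cnt.get("J") is None:
--         return cnt
--     if len(cnt) == 1:
--         return {"J": 5}
--     best = max((k for k in cnt if k != "J"), key=cnt.get)
--     res = {}
--     for k, v in cnt.items():
--         kk = best if k == "J" else k
--         res[kk] = res.get(kk, 0) + v
--     return res
-- ===== Notes on version B (the rewrite author's own statement) =====
-- stated objective: alternative
-- what changed: B counts the whole string once (J included), then instead of A's string replace and second counting pass over the string it folds the joker count into the best key by merging the counter's distinct entries (an O(k) pass over distinct keys, no replaced string is ever built).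
import Mathlib
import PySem

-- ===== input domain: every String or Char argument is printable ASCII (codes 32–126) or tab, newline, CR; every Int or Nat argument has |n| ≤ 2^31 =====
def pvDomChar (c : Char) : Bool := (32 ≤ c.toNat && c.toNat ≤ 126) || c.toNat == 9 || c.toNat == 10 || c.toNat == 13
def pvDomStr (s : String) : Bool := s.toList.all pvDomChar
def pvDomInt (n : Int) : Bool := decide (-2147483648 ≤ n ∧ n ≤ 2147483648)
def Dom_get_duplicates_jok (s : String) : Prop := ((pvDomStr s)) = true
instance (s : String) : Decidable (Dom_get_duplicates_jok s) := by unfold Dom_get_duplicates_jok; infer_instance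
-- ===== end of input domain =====

-- B counts the whole string once (J included) and folds the joker count into the best key by merging the counter's distinct entries, instead of A's skip-J count, string replace and second counting pass over the string; same cost, different decomposition.


-- ===== PORT A =====
-- Python's dict keys are the 1-char strings of s; both ports key by Char and render keys with Char.toString at return.
def get_duplicates_jok (s : String) : List (String × Int) :=
  let res : PySem.Dict Char Int :=
    s.toList.foldl (fun d c => if c ≠ 'J' then d.modify c 0 (· + 1) else d) PySem.Dict.empty
  if PySem.Str.isIn "J" s = false then
    res.items.map (fun p => (p.1.toString, p.2))
  else if res.items = [] then
    [("J", 5)]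
  else
    match PySem.List.max? res.keys (fun k => res.getD k 0) with
    | none => []  -- unreachable: res is nonempty here (Python max would raise on an empty dict)
    | some max_key =>
      let s2 := PySem.Str.replace s "J" max_key.toString
      let res2 : PySem.Dict Char Int :=
        s2.toList.foldl (fun d c => d.modify c 0 (· + 1)) PySem.Dict.empty
      res2.items.map (fun p => (p.1.toString, p.2))

-- ===== PORT B =====
def get_duplicates_jok_alt (s : String) : List (String × Int) :=
  let cnt : PySem.Dict Char Int :=
    s.toList.foldl (fun d c => d.insert c (d.getD c 0 + 1)) PySem.Dict.empty
  match cnt.get? 'J' with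
  | none => cnt.items.map (fun p => (p.1.toString, p.2))
  | some _ =>
    if cnt.size = 1 then
      [("J", 5)]
    else
      match PySem.List.max? (cnt.keys.filter (fun k => k ≠ 'J')) (fun k => cnt.getD k 0) with
      | none => []  -- unreachable: a non-J key exists here (Python max would raise on an empty iterable)
      | some best =>
        let res : PySem.Dict Char Int :=
          cnt.items.foldl (fun d p =>
            let kk := if p.1 = 'J' then best else p.1
            d.insert kk (d.getD kk 0 + p.2)) PySem.Dict.empty
        res.items.map (fun p => (p.1.toString, p.2))

-- ===== PRECONDITION & SPEC =====
def Spec_get_duplicates_jok (s : String) (out : List (String × Int)) : Prop := out = get_duplicates_jok_alt s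
instance (s : String) (out : List (String × Int)) : Decidable (Spec_get_duplicates_jok s out) := by unfold Spec_get_duplicates_jok; infer_instance

-- ===== CLAIM (what is proved, stated in full; the proofs are below) =====
def Claim_equal_get_duplicates_jok : Prop := ∀ (s : String), Dom_get_duplicates_jok s → Spec_get_duplicates_jok s (get_duplicates_jok s)

-- ===== LEMMAS AND PROOFS =====

-- A's skip-J counting loop is counting over the J-free sublist
theorem pv_skip_eq_filter (l : List Char) (d : PySem.Dict Char Int) :
    l.foldl (fun d c => if c ≠ 'J' then d.modify c 0 (· + 1) else d) d
      = (l.filter (fun c => c ≠ 'J')).foldl (fun d c => d.modify c 0 (· + 1)) d := by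
  induction l generalizing d with
  | nil => rfl
  | cons c t ih =>
    by_cases hc : c = 'J'
    · subst hc
      rw [List.foldl_cons, if_neg (by simp), List.filter_cons_of_neg (by simp)]
      exact ih d
    · rw [List.foldl_cons, if_pos hc, List.filter_cons_of_pos (by simp [hc]), List.foldl_cons]
      exact ih _

-- ordered dedup commutes with filter
theorem pv_ofList_filter (q : Char → Bool) (l : List Char) :
    PySem.Set.ofList (l.filter q) = (PySem.Set.ofList l).filter q := by
  induction l using List.reverseRecOn with
  | nil => rfl
  | append_singleton l x ih =>
    rw [List.filter_append, PySem.Set.ofList_append_singleton]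
    by_cases hq : q x = true
    · rw [List.filter_cons_of_pos hq, List.filter_nil, PySem.Set.ofList_append_singleton, ih]
      by_cases hm : x ∈ l
      · rw [PySem.Set.add_of_mem ((PySem.Set.mem_ofList l x).mpr hm),
            PySem.Set.add_of_mem (by rw [List.mem_filter]; exact ⟨(PySem.Set.mem_ofList l x).mpr hm, hq⟩)]
      · rw [PySem.Set.add_of_not_mem (fun h => hm ((PySem.Set.mem_ofList l x).mp h)),
            List.filter_append, List.filter_cons_of_pos hq, List.filter_nil,
            PySem.Set.add_of_not_mem (fun h => hm ((PySem.Set.mem_ofList l x).mp (List.mem_of_mem_filter h)))]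
    · rw [List.filter_cons_of_neg hq, List.filter_nil, List.append_nil, ih]
      by_cases hm : x ∈ l
      · rw [PySem.Set.add_of_mem ((PySem.Set.mem_ofList l x).mpr hm)]
      · rw [PySem.Set.add_of_not_mem (fun h => hm ((PySem.Set.mem_ofList l x).mp h)),
            List.filter_append, List.filter_cons_of_neg hq, List.filter_nil, List.append_nil]

-- ordered dedup absorbs an inner dedup under map
theorem pv_ofList_map_ofList (f : Char → Char) (l : List Char) :
    PySem.Set.ofList ((PySem.Set.ofList l).map f) = PySem.Set.ofList (l.map f) := by
  induction l using List.reverseRecOn with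
  | nil => rfl
  | append_singleton l x ih =>
    have hR : PySem.Set.ofList ((l++[x]).map f) = (PySem.Set.ofList (l.map f)).add (f x) := by
      rw [List.map_append, List.map_singleton, PySem.Set.ofList_append_singleton]
    rw [hR, PySem.Set.ofList_append_singleton, ← ih]
    by_cases hm : x ∈ l
    · rw [PySem.Set.add_of_mem ((PySem.Set.mem_ofList l x).mpr hm),
          PySem.Set.add_of_mem ((PySem.Set.mem_ofList _ (f x)).mpr (List.mem_map_of_mem ((PySem.Set.mem_ofList l x).mpr hm)))]
    · rw [PySem.Set.add_of_not_mem (fun h => hm ((PySem.Set.mem_ofList l x).mp h)),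
          List.map_append, List.map_singleton, PySem.Set.ofList_append_singleton]

-- indicator sum over a nodup list
theorem pv_sum_indicator (S : List Char) (x : Char) (h : S.Nodup) :
    (S.map (fun j => if j = x then (1 : Int) else 0)).sum = if x ∈ S then 1 else 0 := by
  induction S with
  | nil => simp
  | cons a t ih =>
    simp only [List.map_cons, List.sum_cons, List.mem_cons]
    have hnd := (List.nodup_cons.mp h)
    by_cases hax : a = x
    · subst hax
      rw [if_pos rfl, if_pos (Or.inl rfl), ih hnd.2, if_neg hnd.1]
      ring
    · rw [if_neg hax, ih hnd.2]
      by_cases hx : x ∈ t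
      · rw [if_pos hx, if_pos (Or.inr hx)]; ring
      · rw [if_neg hx, if_neg (by rintro (h1|h2); exact hax h1.symm; exact hx h2)]; ring

-- counts of the mapped list partition over the distinct original keys
theorem pv_count_partition (f : Char → Char) (l : List Char) (k : Char) :
    (((PySem.Set.ofList l).filter (fun j => f j == k)).map (fun j => (l.count j : Int))).sum
      = ((l.map f).count k : Int) := by
  induction l using List.reverseRecOn with
  | nil => simp
  | append_singleton l x ih =>
    have hcnt : ∀ j : Char, ((l ++ [x]).count j : Int) = (l.count j : Int) + (if j = x then 1 else 0) := by
      intro j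
      rw [List.count_append]
      by_cases hj : j = x
      · simp [hj]
      · have : ¬ x = j := fun h => hj h.symm
        simp [hj, this]
    have hR : (((l ++ [x]).map f).count k : Int) = ((l.map f).count k : Int) + (if f x = k then 1 else 0) := by
      rw [List.map_append, List.count_append]
      by_cases hfx : f x = k <;> simp [hfx]
    rw [hR, PySem.Set.ofList_append_singleton]
    by_cases hm : x ∈ l
    · rw [PySem.Set.add_of_mem ((PySem.Set.mem_ofList l x).mpr hm)]
      rw [List.map_congr_left (fun j _ => hcnt j), PySem.List.sum_map_add_int, ih,
          pv_sum_indicator _ x (List.Nodup.filter _ (PySem.Set.nodup_ofList l))]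
      by_cases hfx : f x = k
      · rw [if_pos (List.mem_filter.mpr ⟨(PySem.Set.mem_ofList l x).mpr hm, by simp [hfx]⟩), if_pos hfx]
      · rw [if_neg (fun h => hfx (by simpa using (List.mem_filter.mp h).2)), if_neg hfx]
    · rw [PySem.Set.add_of_not_mem (fun h => hm ((PySem.Set.mem_ofList l x).mp h)), List.filter_append]
      have hx0 : (l.count x : Int) = 0 := by simp [List.count_eq_zero_of_not_mem hm]
      have hmain : ((PySem.Set.ofList l).filter (fun j => f j == k)).map (fun j => ((l ++ [x]).count j : Int))
          = ((PySem.Set.ofList l).filter (fun j => f j == k)).map (fun j => (l.count j : Int)) := by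
        apply List.map_congr_left
        intro j hj
        have hjl : j ∈ l := (PySem.Set.mem_ofList l j).mp (List.mem_of_mem_filter hj)
        rw [hcnt j, if_neg (fun h : j = x => hm (h ▸ hjl)), add_zero]
      by_cases hfx : f x = k
      · rw [List.filter_cons_of_pos (by simp [hfx]), List.filter_nil, List.map_append, List.sum_append,
            List.map_singleton, hmain, ih]
        rw [hcnt x, if_pos rfl, hx0, if_pos hfx]
        simp
      · rw [List.filter_cons_of_neg (by simp [hfx]), List.filter_nil, List.append_nil, hmain, ih, if_neg hfx, add_zero]

-- value of B's merging fold, for any key-substitution function q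
theorem pv_merge_getD (q : Char × Int → Char) (items : List (Char × Int)) (d : PySem.Dict Char Int) (k : Char) :
    (items.foldl (fun d p => d.insert (q p) (d.getD (q p) 0 + p.2)) d).getD k 0
      = d.getD k 0 + ((items.filter (fun p => q p == k)).map (·.2)).sum := by
  induction items generalizing d with
  | nil => simp
  | cons p t ih =>
    simp only [List.foldl_cons, List.filter_cons]
    rw [ih]
    by_cases hk : q p = k
    · rw [if_pos (by simp [hk]), PySem.Dict.getD_insert, if_pos hk.symm, ← hk]
      simp
      ring
    · rw [if_neg (by simp [hk]), PySem.Dict.getD_insert, if_neg (fun h => hk h.symm)]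

-- B's merging fold over the counter's items IS the counter of the substituted list
theorem pv_merge_eq_counter (best : Char) (l : List Char) :
    (PySem.Dict.counter l).items.foldl (fun d p =>
        let kk := if p.1 = 'J' then best else p.1
        d.insert kk (d.getD kk 0 + p.2)) PySem.Dict.empty
      = PySem.Dict.counter (l.map (fun c => if c = 'J' then best else c)) := by
  have hkeys : ((PySem.Dict.counter l).items.foldl (fun d p =>
        let kk := if p.1 = 'J' then best else p.1
        d.insert kk (d.getD kk 0 + p.2)) (PySem.Dict.empty : PySem.Dict Char Int)).keys
      = PySem.Set.ofList (l.map (fun c => if c = 'J' then best else c)) := by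
    rw [PySem.Dict.keys_foldl_insert_key ((PySem.Dict.counter l).items)
          (fun p => if p.1 = 'J' then best else p.1)
          (fun d p => d.getD (if p.1 = 'J' then best else p.1) 0 + p.2)]
    rw [PySem.Dict.keys_empty, PySem.Set.update_nil_left]
    have : (PySem.Dict.counter l).items.map (fun p => if p.1 = 'J' then best else p.1)
        = (PySem.Set.ofList l).map (fun c => if c = 'J' then best else c) := by
      rw [PySem.Dict.items_counter, List.map_map]
      rfl
    rw [this, pv_ofList_map_ofList]
  apply PySem.Dict.ext
  rw [PySem.Dict.items_eq_map_keys _ (by rw [hkeys]; exact PySem.Set.nodup_ofList _) 0, hkeys,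
      PySem.Dict.items_counter (l.map (fun c => if c = 'J' then best else c))]
  apply List.map_congr_left
  intro k hk
  have hg := pv_merge_getD (fun p => if p.1 = 'J' then best else p.1) (PySem.Dict.counter l).items PySem.Dict.empty k
  refine Prod.ext rfl ?_
  show (((PySem.Dict.counter l).items.foldl (fun d p =>
        let kk := if p.1 = 'J' then best else p.1
        d.insert kk (d.getD kk 0 + p.2)) PySem.Dict.empty)).getD k 0 = _
  rw [hg, PySem.Dict.getD_empty, zero_add, PySem.Dict.items_counter l]
  rw [List.filter_map, List.map_map]
  have h1 : ((fun p : Char × Int => (if p.1 = 'J' then best else p.1) == k) ∘ (fun j : Char => (j, (l.count j : Int))))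
      = fun j : Char => (if j = 'J' then best else j) == k := rfl
  have h2 : ((fun p : Char × Int => p.2) ∘ (fun j : Char => (j, (l.count j : Int))))
      = fun j : Char => (l.count j : Int) := rfl
  rw [h1, h2, pv_count_partition]

-- one step of Python max(…, key=…)
theorem pv_max?_cons_cons (f : Char → Int) (m a : Char) (t : List Char) :
    PySem.List.max? (m :: a :: t) f = PySem.List.max? ((if f m < f a then a else m) :: t) f := by
  unfold PySem.List.max?
  simp only [List.foldl_cons]
  split_ifs <;> rfl

theorem pv_max?_go (f g : Char → Int) : ∀ (t : List Char) (m : Char),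
    (∀ x ∈ t, f x = g x) → f m = g m →
    PySem.List.max? (m :: t) f = PySem.List.max? (m :: t) g := by
  intro t
  induction t with
  | nil => intro m _ _; rfl
  | cons a t ih =>
    intro m h hm
    have ha : f a = g a := h a (by simp)
    rw [pv_max?_cons_cons f, pv_max?_cons_cons g, ← hm, ← ha]
    by_cases hlt : f m < f a
    · rw [if_pos hlt]
      exact ih a (fun x hx => h x (by simp [hx])) ha
    · rw [if_neg hlt]
      exact ih m (fun x hx => h x (by simp [hx])) hm

-- key congruence for Python max(…, key=…)
theorem pv_max?_congr (xs : List Char) (f g : Char → Int) (h : ∀ x ∈ xs, f x = g x) :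
    PySem.List.max? xs f = PySem.List.max? xs g := by
  cases xs with
  | nil => rfl
  | cons a t => exact pv_max?_go f g t a (fun x hx => h x (by simp [hx])) (h a (by simp))

theorem pv_replace_go (b : Char) : ∀ (fuel : Nat) (l acc : List Char), l.length ≤ fuel →
    PySem.Chars.replace.go ['J'] [b] fuel l acc
      = acc.reverse ++ l.map (fun c => if c = 'J' then b else c) := by
  intro fuel
  induction fuel with
  | zero => intro l acc h; simp at h; simp [h, PySem.Chars.replace.go]
  | succ n ih =>
    intro l acc h
    cases l with
    | nil => simp [PySem.Chars.replace.go]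
    | cons c t =>
      by_cases hc : c = 'J'
      · rw [PySem.Chars.replace.go]
        simp [hc, List.isPrefixOf, ih t _ (by simpa using h)]
      · rw [PySem.Chars.replace.go]
        simp [List.isPrefixOf, hc, ih t _ (by simpa using h), Ne.symm hc]

-- replacing the single char 'J' by the single char b is a map
theorem pv_replace_map (l : List Char) (b : Char) :
    PySem.Chars.replace l ['J'] [b] = l.map (fun c => if c = 'J' then b else c) := by
  rw [PySem.Chars.replace]
  simp [pv_replace_go b l.length l [] le_rfl]

theorem pv_isIn_iff (s : String) : PySem.Str.isIn "J" s = true ↔ 'J' ∈ s.toList := by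
  rw [PySem.Str.isIn_iff_infix]
  constructor
  · intro h; exact h.mem (by simp)
  · intro h
    obtain ⟨u, w, hw⟩ := List.mem_iff_append.mp h
    exact ⟨u, w, by simp [hw]⟩

-- all chars 'J' → ordered dedup is ['J']
theorem pv_ofList_all_J (l : List Char) (hne : l ≠ []) (hall : ∀ c ∈ l, c = 'J') :
    PySem.Set.ofList l = ['J'] := by
  induction l with
  | nil => exact absurd rfl hne
  | cons a t ih =>
    have ha : a = 'J' := hall a (by simp)
    subst ha
    rw [PySem.Set.ofList_cons]
    by_cases ht : t = []
    · subst ht; rfl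
    · rw [ih ht (fun c hc => hall c (by simp [hc]))]
      rfl

theorem pv_main (s : String) : get_duplicates_jok s = get_duplicates_jok_alt s := by
  simp only [get_duplicates_jok, get_duplicates_jok_alt]
  rw [pv_skip_eq_filter, ← PySem.Dict.counter_eq_foldl, PySem.Dict.foldl_insert_getD_add_one_eq_counter]
  by_cases hmem : 'J' ∈ s.toList
  · -- J present
    have hIn : PySem.Str.isIn "J" s = true := (pv_isIn_iff s).mpr hmem
    have hget : (PySem.Dict.counter s.toList).get? 'J' ≠ none := by
      intro h
      rw [PySem.Dict.get?_eq_none_iff_contains, PySem.Dict.contains_counter] at h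
      simp [hmem] at h
    rw [if_neg (by rw [hIn]; simp)]
    cases hg : (PySem.Dict.counter s.toList).get? 'J' with
    | none => exact absurd hg hget
    | some j =>
      by_cases hall : ∀ c ∈ s.toList, c = 'J'
      · -- all chars J
        have hlf : s.toList.filter (fun c => c ≠ 'J') = [] := by
          rw [List.filter_eq_nil_iff]; intro c hc; simp [hall c hc]
        have hsize : (PySem.Dict.counter s.toList).size = 1 := by
          show (PySem.Dict.counter s.toList).items.length = 1
          rw [PySem.Dict.items_counter, List.length_map,
              pv_ofList_all_J s.toList (fun h0 => by rw [h0] at hmem; simp at hmem) hall]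
          rfl
        rw [hlf, if_pos (by rw [PySem.Dict.counter_eq_foldl]; rfl), if_pos hsize]
      · -- a non-J char exists
        push Not at hall
        obtain ⟨c, hcl, hcJ⟩ := hall
        have hclf : c ∈ s.toList.filter (fun c => c ≠ 'J') := by
          rw [List.mem_filter]; exact ⟨hcl, by simp [hcJ]⟩
        have hlfne : s.toList.filter (fun c => c ≠ 'J') ≠ [] := fun h => by
          rw [h] at hclf; simp at hclf
        have hresne : (PySem.Dict.counter (s.toList.filter (fun c => c ≠ 'J'))).items ≠ [] := by
          rw [PySem.Dict.items_counter]
          intro h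
          rw [List.map_eq_nil_iff] at h
          have := (PySem.Set.mem_ofList _ c).mpr hclf
          rw [h] at this
          simp at this
        have hsizene : ¬ (PySem.Dict.counter s.toList).size = 1 := by
          intro h1
          have hsz : (PySem.Set.ofList s.toList).length = 1 := by
            have h2 : (PySem.Dict.counter s.toList).items.length = 1 := h1
            rwa [PySem.Dict.items_counter, List.length_map] at h2
          obtain ⟨a, ha⟩ := List.length_eq_one_iff.mp hsz
          have hJ := (PySem.Set.mem_ofList s.toList 'J').mpr hmem
          have hc := (PySem.Set.mem_ofList s.toList c).mpr hcl
          rw [ha] at hJ hc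
          simp at hJ hc
          exact hcJ (hc.trans hJ.symm)
        rw [if_neg hresne, if_neg hsizene]
        have hmax : PySem.List.max? (PySem.Dict.counter (s.toList.filter (fun c => c ≠ 'J'))).keys
              (fun k => (PySem.Dict.counter (s.toList.filter (fun c => c ≠ 'J'))).getD k 0)
            = PySem.List.max? ((PySem.Dict.counter s.toList).keys.filter (fun k => k ≠ 'J'))
              (fun k => (PySem.Dict.counter s.toList).getD k 0) := by
          rw [PySem.Dict.keys_counter, PySem.Dict.keys_counter, pv_ofList_filter]
          apply pv_max?_congr
          intro x hx
          have hxJ : (fun c : Char => decide (c ≠ 'J')) x = true := (List.mem_filter.mp hx).2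
          rw [PySem.Dict.getD_counter, PySem.Dict.getD_counter]
          norm_cast
          exact List.count_filter hxJ
        rw [hmax]
        cases hmx : PySem.List.max? ((PySem.Dict.counter s.toList).keys.filter (fun k => k ≠ 'J'))
            (fun k => (PySem.Dict.counter s.toList).getD k 0) with
        | none => rfl
        | some best =>
          have hs2 : (PySem.Str.replace s "J" best.toString).toList
              = s.toList.map (fun c => if c = 'J' then best else c) := by
            rw [PySem.Str.toList_replace]
            have hb : best.toString.toList = [best] := by simp
            rw [hb, show ("J" : String).toList = ['J'] from rfl, pv_replace_map]
          simp only [hs2, ← PySem.Dict.counter_eq_foldl, pv_merge_eq_counter]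
  · -- no J
    have hIn : PySem.Str.isIn "J" s = false := by
      cases h : PySem.Str.isIn "J" s
      · rfl
      · exact absurd ((pv_isIn_iff s).mp h) hmem
    have hget : (PySem.Dict.counter s.toList).get? 'J' = none := by
      rw [PySem.Dict.get?_eq_none_iff_contains, PySem.Dict.contains_counter]
      simp [hmem]
    rw [if_pos hIn, hget, List.filter_eq_self.mpr (fun c hc => by simp; rintro rfl; exact hmem hc)]

-- ===== VERDICT (by name: the statement is the Claim_ definition above) =====
theorem get_duplicates_jok_spec : Claim_equal_get_duplicates_jok := by
  intro s _
  unfold Spec_get_duplicates_jok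
  exact pv_main s
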